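-- pv_equiv track=rewrite | github.com/dmasad/NK-Model-Experiments | NKModel.py | _num_to_tuple
-- ===== SOURCE A (Python) =====
-- def _num_to_tuple(num, length):
--     '''
--     Convert a number to a tuple of its binary representation.
--     '''
--     binary = bin(num)[2:]
--     while len(binary) < length:
--         binary = "0" + binary
--     if len(binary) > length:
--         raise Exception("Number too big to belong here!")
--     binary = list(binary)
--     bits = [int(b) for b in binary]
--     return tuple(bits)
-- ===== SOURCE B (Python) =====
-- def _num_to_tuple(num, length):
--     '''
--     Convert a number to a tuple of its binary representation.
--     '''
--     if num < 0 or num.bit_length() > length: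
--         raise Exception("Number too big to belong here!")
--     bits = []
--     n = num
--     for _ in range(length):
--         bits.append(n & 1)
--         n >>= 1
--     bits.reverse()
--     return tuple(bits)
-- ===== Notes on version B (the rewrite author's own statement) =====
-- stated objective: faster
-- what changed: B replaces A's string round-trip (bin(), a while-loop prepending '0' chars one at a time, re-parsing each char with int) by a single arithmetic loop extracting the low bit length times and reversing, with an up-front bit_length bound check.
import Mathlib
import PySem

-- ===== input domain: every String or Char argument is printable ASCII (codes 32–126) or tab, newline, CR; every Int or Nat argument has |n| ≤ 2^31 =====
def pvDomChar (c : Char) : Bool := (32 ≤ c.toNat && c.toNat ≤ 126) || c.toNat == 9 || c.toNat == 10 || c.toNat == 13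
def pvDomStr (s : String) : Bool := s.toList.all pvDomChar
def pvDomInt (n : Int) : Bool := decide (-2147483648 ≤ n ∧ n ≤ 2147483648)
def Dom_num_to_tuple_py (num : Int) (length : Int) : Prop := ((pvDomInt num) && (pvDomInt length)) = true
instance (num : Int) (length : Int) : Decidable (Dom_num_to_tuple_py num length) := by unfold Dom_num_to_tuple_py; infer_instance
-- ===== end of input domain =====

-- B drops A's string round-trip (bin / pad / re-parse chars) and extracts the bits arithmetically
-- low-to-high, then reverses (alternative decomposition; also avoids A's repeated string prepending).


-- ===== PORT A =====
-- digits of bin(n) written by repeated division, n ≥ 1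
def pvBinDigits (n : Nat) : List Char :=
  if n = 0 then [] else pvBinDigits (n / 2) ++ [if n % 2 = 1 then '1' else '0']
decreasing_by exact Nat.div_lt_self (by omega) (by norm_num)

-- bin(n)[2:] for n ≥ 0 (Pre_ excludes negative num, where Python A raises ValueError)
def pvBin (n : Nat) : List Char := if n = 0 then ['0'] else pvBinDigits n

-- while len(binary) < length: binary = "0" + binary
def pvPad (b : List Char) (length : Int) : List Char :=
  if (b.length : Int) < length then pvPad ('0' :: b) length else b
termination_by (length - b.length).toNat
decreasing_by simp only [List.length_cons]; omega

-- int(c) for one char: exact on the digit chars '0'/'1', the only chars reaching it inside Pre_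
def pvDigit (c : Char) : Int := (c.toNat : Int) - 48

def num_to_tuple_py (num : Int) (length : Int) : List Int :=
  -- binary = bin(num)[2:]; then the padding while-loop
  if ((pvPad (pvBin num.toNat) length).length : Int) > length then []  -- raise Exception (excluded by Pre_)
  else (pvPad (pvBin num.toNat) length).map pvDigit   -- bits = [int(b) for b in binary]

-- ===== PORT B =====
-- the for-loop over range(length): bits.append(n & 1); n >>= 1
def pvLowBits (n : Nat) (fuel : Nat) : List Int :=
  match fuel with
  | 0 => []
  | f + 1 => ((n &&& 1 : Nat) : Int) :: pvLowBits (n >>> 1) f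

def num_to_tuple_py_alt (num : Int) (length : Int) : List Int :=
  -- if num < 0 or num.bit_length() > length: raise  (Nat.size = bit_length on ℕ)
  if num < 0 ∨ (Nat.size num.toNat : Int) > length then []
  else (pvLowBits num.toNat length.toNat).reverse   -- bits.reverse()

-- ===== PRECONDITION & SPEC =====
-- Pre_ = exactly where Python A returns: num ≥ 0 (else int('b…') raises ValueError),
-- and the binary representation fits: 1 ≤ length and num < 2^length (else A raises its Exception).
def Pre_num_to_tuple_py (num : Int) (length : Int) : Prop :=
  0 ≤ num ∧ 1 ≤ length ∧ num < (2 : Int) ^ length.toNat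
instance (num : Int) (length : Int) : Decidable (Pre_num_to_tuple_py num length) := by
  unfold Pre_num_to_tuple_py; infer_instance

def pvWitness_num_to_tuple_py : Int × Int := (5, 4)

def Spec_num_to_tuple_py (num : Int) (length : Int) (out : List Int) : Prop := out = num_to_tuple_py_alt num length
instance (num : Int) (length : Int) (out : List Int) : Decidable (Spec_num_to_tuple_py num length out) := by unfold Spec_num_to_tuple_py; infer_instance

-- ===== CLAIM (what is proved, stated in full; the proofs are below) =====
def Claim_equal_num_to_tuple_py : Prop := ∀ (num : Int) (length : Int), Dom_num_to_tuple_py num length → Pre_num_to_tuple_py num length → Spec_num_to_tuple_py num length (num_to_tuple_py num length)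

-- ===== LEMMAS AND PROOFS =====

theorem pvBin_zero : pvBin 0 = ['0'] := rfl

theorem pvBinDigits_one : pvBinDigits 1 = ['1'] := by
  rw [pvBinDigits]
  norm_num
  rw [pvBinDigits]
  norm_num

theorem pvBin_one : pvBin 1 = ['1'] := by
  rw [pvBin, if_neg one_ne_zero, pvBinDigits_one]

theorem pvDigit_zero : pvDigit '0' = 0 := by decide

theorem pvDigit_one : pvDigit '1' = 1 := by decide

theorem pvBinDigits_length_le (L : Nat) : ∀ n : Nat, n < 2 ^ L → (pvBinDigits n).length ≤ L := by
  induction L with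
  | zero =>
    intro n hn
    interval_cases n
    simp [pvBinDigits]
  | succ L ih =>
    intro n hn
    by_cases h : n = 0
    · rw [pvBinDigits, if_pos h]; simp
    · rw [pvBinDigits, if_neg h]
      have h2 : 2 ^ (L + 1) = 2 ^ L * 2 := by ring
      have := ih (n / 2) (by omega)
      simp only [List.length_append, List.length_singleton]
      omega

theorem pvPad_eq (L : Int) : ∀ k : Nat, ∀ b : List Char, (L - b.length).toNat = k →
    pvPad b L = List.replicate k '0' ++ b := by
  intro k
  induction k with
  | zero =>
    intro b hk
    rw [pvPad, if_neg (by omega)]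
    simp
  | succ k ih =>
    intro b hk
    rw [pvPad, if_pos (by omega)]
    rw [ih ('0' :: b) (by simp only [List.length_cons]; omega)]
    rw [List.replicate_succ']
    simp

theorem pvMain (L : Nat) : ∀ n : Nat, 1 ≤ L → n < 2 ^ L →
    (pvLowBits n L).reverse
      = List.replicate (L - (pvBin n).length) 0 ++ (pvBin n).map pvDigit := by
  induction L with
  | zero => intro n h; omega
  | succ L ih =>
    intro n _ hn
    by_cases hL : L = 0
    · subst hL
      interval_cases n
      · rw [pvBin_zero]; decide
      · rw [pvBin_one]; decide
    · have hL1 : 1 ≤ L := by omega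
      have hpow : 2 ^ (L + 1) = 2 ^ L * 2 := by ring
      have hdiv : n / 2 < 2 ^ L := by omega
      have step : (pvLowBits n (L + 1)).reverse
          = (pvLowBits (n / 2) L).reverse ++ [((n % 2 : Nat) : Int)] := by
        simp [pvLowBits, Nat.and_one_is_mod, Nat.shiftRight_one]
      rw [step, ih (n / 2) hL1 hdiv]
      by_cases h1 : n ≤ 1
      · have h2 : n / 2 = 0 := by omega
        rw [h2]
        interval_cases n
        · simp only [pvBin_zero, List.length_singleton, List.map_singleton, pvDigit_zero]
          rw [show L + 1 - 1 = (L - 1) + 1 from by omega, List.replicate_succ',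
              show L - 1 = L - List.length ['0'] from by simp]
          norm_num
        · simp only [pvBin_zero, pvBin_one, List.length_singleton, List.map_singleton,
            pvDigit_zero, pvDigit_one]
          rw [show L + 1 - 1 = (L - 1) + 1 from by omega, List.replicate_succ',
              show L - 1 = L - List.length ['0'] from by simp]
          norm_num
      · have hn0 : n ≠ 0 := by omega
        have hd0 : n / 2 ≠ 0 := by omega
        have hsplit : pvBin n = pvBin (n / 2) ++ [if n % 2 = 1 then '1' else '0'] := by
          rw [pvBin, if_neg hn0, pvBin, if_neg hd0, pvBinDigits, if_neg hn0]
        have hdig : pvDigit (if n % 2 = 1 then '1' else '0') = ((n % 2 : Nat) : Int) := by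
          have : n % 2 = 0 ∨ n % 2 = 1 := by omega
          rcases this with h | h <;> simp [h, pvDigit_zero, pvDigit_one]
        have hlen : (pvBin (n / 2)).length ≤ L := by
          rw [pvBin, if_neg hd0]; exact pvBinDigits_length_le L _ hdiv
        rw [hsplit, List.map_append, List.map_singleton, hdig,
            List.length_append, List.length_singleton]
        rw [show (L + 1 - ((pvBin (n / 2)).length + 1)) = L - (pvBin (n / 2)).length from by omega]
        simp [List.append_assoc]

-- ===== VERDICT (by name: the statement is the Claim_ definition above) =====
theorem num_to_tuple_py_spec : Claim_equal_num_to_tuple_py := by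
  intro num length _ hpre
  obtain ⟨h0, h1, h2⟩ := hpre
  obtain ⟨n, rfl⟩ : ∃ n : Nat, num = ↑n := ⟨num.toNat, (Int.toNat_of_nonneg h0).symm⟩
  obtain ⟨L, rfl⟩ : ∃ L : Nat, length = ↑L := ⟨length.toNat, (Int.toNat_of_nonneg (by omega)).symm⟩
  have hL1 : 1 ≤ L := by exact_mod_cast h1
  have hnL : n < 2 ^ L := by
    have h2' : (n : Int) < (2 : Int) ^ L := by simpa using h2
    exact_mod_cast h2'
  have hsize : Nat.size n ≤ L := Nat.size_le.mpr hnL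
  have hblen : (pvBin n).length ≤ L := by
    by_cases h : n = 0
    · simpa [pvBin, h] using hL1
    · rw [pvBin, if_neg h]; exact pvBinDigits_length_le L n hnL
  unfold Spec_num_to_tuple_py num_to_tuple_py num_to_tuple_py_alt
  simp only [Int.toNat_natCast]
  have hpad : pvPad (pvBin n) ↑L = List.replicate (L - (pvBin n).length) '0' ++ pvBin n :=
    pvPad_eq (↑L) (L - (pvBin n).length) (pvBin n) (by omega)
  rw [hpad]
  rw [if_neg (by simp only [List.length_append, List.length_replicate]; omega)]
  rw [if_neg (by push Not; exact ⟨by positivity, by exact_mod_cast hsize⟩)]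
  rw [pvMain L n hL1 hnL, List.map_append, List.map_replicate, pvDigit_zero]
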